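-- pv_equiv track=rewrite | github.com/philana-williams/advent-of-code | 2024/day2/advent_of_code_day2_part1.py | determineSafe
-- ===== SOURCE A (Python) =====
-- def determineSafe(integerTuple):
--
--     safeBool = True # assume njumber will be safe
--     # safe means:
--         # 1 . all levels are decreasing or decreasing
--         # 2 . min distance between numbers is 1, max distance between consecutive numbers are 3
--
--
--     changeDict = {"increase":0,"decrease":0,"no change":0}
--     maxChange = 0
--     minChange = float('inf')
--
--     for currIndex in range(len(integerTuple)-1):
--         currNumber = integerTuple[currIndex]
--
--         nextIndex = currIndex+1
--         nextNumber = integerTuple[nextIndex]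
--
--         numDistance = abs(currNumber - nextNumber)
--
--         if numDistance > maxChange:
--             maxChange = numDistance
--
--         if numDistance < minChange:
--             minChange = numDistance
--
--         if currNumber == nextNumber:
--             changeDict["no change"]+=1
--         elif currNumber < nextNumber:
--             changeDict["increase"]+=1
--         else: # currNumber > nextNumber
--             changeDict["decrease"]+=1
--
--     # change greater than 3 --> unsafe
--     if maxChange > 3:
--         safeBool = False
--     # change less than 1 --> unsafe
--     if minChange < 1:
--         safeBool = False
--
--     # no change --> unsafe
--     if changeDict["no change"]>0:
--         safeBool = False
--
--     # increase and decrease in same list --> unsafe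
--     if changeDict["increase"]>0 and changeDict["decrease"]>0:
--         safeBool = False
--
--     return safeBool
-- ===== SOURCE B (Python) =====
-- def determineSafe(integerTuple):
--     diffs = [b - a for a, b in zip(integerTuple, integerTuple[1:])]
--     return all(1 <= d <= 3 for d in diffs) or all(-3 <= d <= -1 for d in diffs)
-- ===== Notes on version B (the rewrite author's own statement) =====
-- stated objective: simpler
-- what changed: Replaces A's change-count dict plus running min/max absolute-distance accumulators with two quantifier scans over the signed consecutive differences (all in 1..3, or all in -3..-1); the comprehension plus short-circuiting all() also makes it measurably faster by a constant factor.
import Mathlib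
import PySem

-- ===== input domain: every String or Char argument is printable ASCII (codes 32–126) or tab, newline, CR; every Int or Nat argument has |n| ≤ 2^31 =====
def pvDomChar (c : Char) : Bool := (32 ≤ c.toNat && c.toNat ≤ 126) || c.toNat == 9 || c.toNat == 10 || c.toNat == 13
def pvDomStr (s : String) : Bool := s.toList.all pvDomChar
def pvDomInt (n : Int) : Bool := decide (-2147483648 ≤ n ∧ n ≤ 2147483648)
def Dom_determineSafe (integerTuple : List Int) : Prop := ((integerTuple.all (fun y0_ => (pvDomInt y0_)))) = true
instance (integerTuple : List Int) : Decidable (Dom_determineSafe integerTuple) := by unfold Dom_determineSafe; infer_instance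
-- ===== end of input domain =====

-- B replaces A's change-count dict and running min/max-distance accumulators with two
-- quantifier scans over the signed consecutive differences (objective: simpler).

-- ===== PORT A =====
-- transliteration of A; minChange = float('inf') is modelled as `none` (exact: the only
-- uses are `numDistance < minChange`, always true for inf, and `minChange < 1`, false for inf)
def determineSafe (integerTuple : List Int) : Bool :=
  let st :=
    (PySem.List.pyRange 0 (PySem.List.len integerTuple - 1) 1).foldl
      (fun st currIndex =>
        let currNumber := PySem.List.pyGetD integerTuple currIndex 0
        let nextIndex := currIndex + 1
        let nextNumber := PySem.List.pyGetD integerTuple nextIndex 0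
        let numDistance := |currNumber - nextNumber|
        let maxChange := if numDistance > st.1 then numDistance else st.1
        let minChange : Option Int :=
          match st.2.1 with
          | none => some numDistance
          | some v => if numDistance < v then some numDistance else some v
        let changeDict :=
          if currNumber == nextNumber then st.2.2.modify "no change" 0 (· + 1)
          else if currNumber < nextNumber then st.2.2.modify "increase" 0 (· + 1)
          else st.2.2.modify "decrease" 0 (· + 1)
        (maxChange, minChange, changeDict))
      ((0 : Int), (none : Option Int),
        PySem.Dict.ofList [("increase", (0 : Int)), ("decrease", 0), ("no change", 0)])
  let safeBool := true
  let safeBool := if st.1 > 3 then false else safeBool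
  let safeBool := if (match st.2.1 with | none => false | some v => v < 1) then false else safeBool
  let safeBool := if st.2.2.getD "no change" 0 > 0 then false else safeBool
  let safeBool := if st.2.2.getD "increase" 0 > 0 && st.2.2.getD "decrease" 0 > 0 then false
                  else safeBool
  safeBool

-- ===== PORT B =====
def determineSafe_alt (integerTuple : List Int) : Bool :=
  let diffs := (integerTuple.zip (PySem.List.slice integerTuple (some 1) none)).map
    (fun p => p.2 - p.1)
  diffs.all (fun d => 1 ≤ d && d ≤ 3) || diffs.all (fun d => -3 ≤ d && d ≤ -1)

-- ===== PRECONDITION & SPEC =====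
def Spec_determineSafe (integerTuple : List Int) (out : Bool) : Prop := out = determineSafe_alt integerTuple
instance (integerTuple : List Int) (out : Bool) : Decidable (Spec_determineSafe integerTuple out) := by unfold Spec_determineSafe; infer_instance

-- ===== CLAIM (what is proved, stated in full; the proofs are below) =====
def Claim_equal_determineSafe : Prop := ∀ (integerTuple : List Int), Dom_determineSafe integerTuple → Spec_determineSafe integerTuple (determineSafe integerTuple)

-- ===== LEMMAS AND PROOFS =====

theorem pvIdxFold {σ : Type} (xs : List Int) (f : σ → Int → Int → σ) (s : σ) :
    (PySem.List.pyRange 0 (PySem.List.len xs - 1) 1).foldl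
      (fun acc i => f acc (PySem.List.pyGetD xs i 0) (PySem.List.pyGetD xs (i + 1) 0)) s
    = (xs.zip xs.tail).foldl (fun acc p => f acc p.1 p.2) s := by
  classical
  set ps := xs.zip xs.tail with hps
  cases xs with
  | nil => simp [PySem.List.pyRange_one_eq_nil, hps]
  | cons x rest =>
    have hlen : ps.length = rest.length := by
      simp [hps, List.length_zip]
    have hbound : PySem.List.len (x :: rest) - 1 = ((ps.length : Int)) := by
      simp [PySem.List.len_eq, hlen]
    rw [hbound]
    have hcong :
        (PySem.List.pyRange 0 ((ps.length : Int)) 1).foldl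
          (fun acc i => f acc (PySem.List.pyGetD (x :: rest) i 0)
            (PySem.List.pyGetD (x :: rest) (i + 1) 0)) s
        = (PySem.List.pyRange 0 ((ps.length : Int)) 1).foldl
          (fun acc i => (fun acc (p : Int × Int) => f acc p.1 p.2) acc
            (PySem.List.pyGetD ps i (0, 0))) s := by
      apply PySem.List.foldl_congr_mem
      intro acc i hi
      rw [PySem.List.mem_pyRange_one] at hi
      obtain ⟨h0, hlt⟩ := hi
      have hltn : i.toNat < ps.length := by omega
      have hxs1 : i.toNat < (x :: rest).length := by simp; omega
      have hxs2 : (i + 1).toNat < (x :: rest).length := by simp; omega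
      have e1 : PySem.List.pyGetD (x :: rest) i 0 = (x :: rest)[i.toNat]'hxs1 :=
        PySem.List.pyGetD_eq_getElem _ 0 h0 (by simp; omega)
      have e2 : PySem.List.pyGetD (x :: rest) (i + 1) 0 = (x :: rest)[(i+1).toNat]'hxs2 :=
        PySem.List.pyGetD_eq_getElem _ 0 (by omega) (by simp; omega)
      have e3 : PySem.List.pyGetD ps i (0, 0) = ps[i.toNat]'hltn :=
        PySem.List.pyGetD_eq_getElem _ (0, 0) h0 (by omega)
      have hz : ps[i.toNat]'hltn = ((x :: rest)[i.toNat]'hxs1,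
          (x :: rest)[(i + 1).toNat]'hxs2) := by
        have ht : (i + 1).toNat = i.toNat + 1 := by omega
        simp [hps, List.getElem_zip, ht]
      rw [e1, e2, e3, hz]
    rw [hcong, PySem.List.foldl_pyRange_zero_pyGetD' ps (0, 0) (fun acc p => f acc p.1 p.2) s]

-- pvIdxFold specialised to A's loop body
theorem pvIdxFoldA (xs : List Int) (s : Int × Option Int × PySem.Dict String Int) :
    (PySem.List.pyRange 0 (PySem.List.len xs - 1) 1).foldl
      (fun st currIndex =>
        (if |PySem.List.pyGetD xs currIndex 0 - PySem.List.pyGetD xs (currIndex + 1) 0| > st.1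
          then |PySem.List.pyGetD xs currIndex 0 - PySem.List.pyGetD xs (currIndex + 1) 0|
          else st.1,
         match st.2.1 with
         | none => some |PySem.List.pyGetD xs currIndex 0 - PySem.List.pyGetD xs (currIndex + 1) 0|
         | some v =>
           if |PySem.List.pyGetD xs currIndex 0 - PySem.List.pyGetD xs (currIndex + 1) 0| < v
           then some |PySem.List.pyGetD xs currIndex 0 - PySem.List.pyGetD xs (currIndex + 1) 0|
           else some v,
         if PySem.List.pyGetD xs currIndex 0 == PySem.List.pyGetD xs (currIndex + 1) 0
         then st.2.2.modify "no change" 0 (· + 1)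
         else if PySem.List.pyGetD xs currIndex 0 < PySem.List.pyGetD xs (currIndex + 1) 0
           then st.2.2.modify "increase" 0 (· + 1)
           else st.2.2.modify "decrease" 0 (· + 1))) s
    = (xs.zip xs.tail).foldl
      (fun st p =>
        (if |p.1 - p.2| > st.1 then |p.1 - p.2| else st.1,
         match st.2.1 with
         | none => some |p.1 - p.2|
         | some v => if |p.1 - p.2| < v then some |p.1 - p.2| else some v,
         if p.1 == p.2 then st.2.2.modify "no change" 0 (· + 1)
         else if p.1 < p.2 then st.2.2.modify "increase" 0 (· + 1)
         else st.2.2.modify "decrease" 0 (· + 1))) s :=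
  pvIdxFold xs (fun st a b =>
    (if |a - b| > st.1 then |a - b| else st.1,
     match st.2.1 with
     | none => some |a - b|
     | some v => if |a - b| < v then some |a - b| else some v,
     if a == b then st.2.2.modify "no change" 0 (· + 1)
     else if a < b then st.2.2.modify "increase" 0 (· + 1)
     else st.2.2.modify "decrease" 0 (· + 1))) s

theorem pvLogic (ps : List (Int × Int))
    (h3 : ∀ p ∈ ps, ¬ (3 : Int) < |p.1 - p.2|)
    (h1 : ∀ p ∈ ps, ¬ |p.1 - p.2| < 1)
    (hmix : ¬ ((∃ p ∈ ps, p.1 < p.2) ∧ (∃ p ∈ ps, p.2 < p.1))) :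
    (∀ p ∈ ps, 1 ≤ p.2 - p.1 ∧ p.2 - p.1 ≤ 3) ∨ (∀ p ∈ ps, -3 ≤ p.2 - p.1 ∧ p.2 - p.1 ≤ -1) := by
  by_cases hpos : ∃ p ∈ ps, p.1 < p.2
  · left
    intro p hp
    have hne := h1 p hp
    have hle := h3 p hp
    have : ¬ p.2 < p.1 := fun hc => hmix ⟨hpos, p, hp, hc⟩
    cases abs_cases (p.1 - p.2) <;> omega
  · right
    intro p hp
    have hne := h1 p hp
    have hle := h3 p hp
    have : ¬ p.1 < p.2 := fun hc => hpos ⟨p, hp, hc⟩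
    cases abs_cases (p.1 - p.2) <;> omega

theorem pvLogicRev (ps : List (Int × Int)) (p : Int × Int) (hp : p ∈ ps)
    (h : (∀ q ∈ ps, 1 ≤ q.2 - q.1 ∧ q.2 - q.1 ≤ 3) ∨ (∀ q ∈ ps, -3 ≤ q.2 - q.1 ∧ q.2 - q.1 ≤ -1)) :
    ¬ (3 : Int) < |p.1 - p.2| ∧ ¬ |p.1 - p.2| < 1 := by
  cases h with
  | inl h => have := h p hp; cases abs_cases (p.1 - p.2) <;> omega
  | inr h => have := h p hp; cases abs_cases (p.1 - p.2) <;> omega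

-- the max accumulator exceeds 3 iff it started above 3 or some pair is more than 3 apart
theorem pvMaxChar (ps : List (Int × Int)) (mx : Int) :
    (ps.foldl (fun m (p : Int × Int) =>
        if |p.1 - p.2| > m then |p.1 - p.2| else m) mx > 3)
    ↔ (mx > 3 ∨ ∃ p ∈ ps, |p.1 - p.2| > 3) := by
  induction ps generalizing mx with
  | nil => simp
  | cons q t ih =>
    simp only [List.foldl_cons, ih, List.mem_cons]
    constructor
    · rintro (h | h)
      · split_ifs at h with hq
        · right; exact ⟨q, Or.inl rfl, h⟩
        · exact Or.inl h
      · obtain ⟨p, hp, hx⟩ := h; exact Or.inr ⟨p, Or.inr hp, hx⟩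
    · rintro (h | ⟨p, (rfl | hp), hx⟩)
      · left; split_ifs with hq <;> omega
      · left; split_ifs with hq <;> omega
      · exact Or.inr ⟨p, hp, hx⟩

-- the min accumulator (none = inf) ends below 1 iff it started below 1 or some pair is < 1 apart
theorem pvMinChar (ps : List (Int × Int)) (mn : Option Int) :
    (match ps.foldl (fun (m : Option Int) (p : Int × Int) =>
        match m with
        | none => some |p.1 - p.2|
        | some v => if |p.1 - p.2| < v then some |p.1 - p.2| else some v) mn with
      | none => False
      | some v => v < 1)
    ↔ ((match mn with | none => False | some v => v < 1) ∨ ∃ p ∈ ps, |p.1 - p.2| < 1) := by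
  induction ps generalizing mn with
  | nil => simp
  | cons q t ih =>
    simp only [List.foldl_cons, List.mem_cons]
    cases mn with
    | none =>
      rw [ih]
      constructor
      · rintro (h | ⟨p, hp, h1⟩)
        · exact Or.inr ⟨q, Or.inl rfl, h⟩
        · exact Or.inr ⟨p, Or.inr hp, h1⟩
      · rintro (h | ⟨p, (rfl | hp), h1⟩)
        · exact h.elim
        · exact Or.inl h1
        · exact Or.inr ⟨p, hp, h1⟩
    | some v =>
      rw [ih]
      by_cases hq : |q.1 - q.2| < v
      · simp only [if_pos hq]
        constructor
        · rintro (h | ⟨p, hp, h1⟩)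
          · exact Or.inr ⟨q, Or.inl rfl, h⟩
          · exact Or.inr ⟨p, Or.inr hp, h1⟩
        · rintro (h | ⟨p, (rfl | hp), h1⟩)
          · exact Or.inl (by omega)
          · exact Or.inl h1
          · exact Or.inr ⟨p, hp, h1⟩
      · simp only [if_neg hq]
        constructor
        · rintro (h | ⟨p, hp, h1⟩)
          · exact Or.inl h
          · exact Or.inr ⟨p, Or.inr hp, h1⟩
        · rintro (h | ⟨p, (rfl | hp), h1⟩)
          · exact Or.inl h
          · exact Or.inl (by omega)
          · exact Or.inr ⟨p, hp, h1⟩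

-- the dict loop, read at one of the three keys, counts the pairs in that direction
theorem pvDictChar (ps : List (Int × Int)) (d : PySem.Dict String Int) (k : String)
    (hk : k = "no change" ∨ k = "increase" ∨ k = "decrease") :
    (ps.foldl (fun (d : PySem.Dict String Int) (p : Int × Int) =>
        if p.1 == p.2 then d.modify "no change" 0 (· + 1)
        else if p.1 < p.2 then d.modify "increase" 0 (· + 1)
        else d.modify "decrease" 0 (· + 1)) d).getD k 0
    = d.getD k 0 + ps.countP (fun p =>
        if k = "no change" then p.1 == p.2
        else if k = "increase" then decide (p.1 < p.2)
        else decide (p.2 < p.1)) := by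
  induction ps generalizing d with
  | nil => simp
  | cons q t ih =>
    simp only [List.foldl_cons, List.countP_cons, ih]
    rcases hk with rfl | rfl | rfl <;>
      by_cases h1 : q.1 = q.2 <;>
      first
        | (simp [h1, PySem.Dict.getD_modify]; omega)
        | (by_cases h2 : q.1 < q.2 <;>
            simp [h1, h2, PySem.Dict.getD_modify] <;> omega)

-- pvDictChar at each of the three keys
theorem pvDictNc (ps : List (Int × Int)) (d : PySem.Dict String Int) :
    (ps.foldl (fun (d : PySem.Dict String Int) (p : Int × Int) =>
        if p.1 == p.2 then d.modify "no change" 0 (· + 1)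
        else if p.1 < p.2 then d.modify "increase" 0 (· + 1)
        else d.modify "decrease" 0 (· + 1)) d).getD "no change" 0
    = d.getD "no change" 0 + ps.countP (fun p => p.1 == p.2) := by
  simpa using pvDictChar ps d "no change" (Or.inl rfl)
theorem pvDictInc (ps : List (Int × Int)) (d : PySem.Dict String Int) :
    (ps.foldl (fun (d : PySem.Dict String Int) (p : Int × Int) =>
        if p.1 == p.2 then d.modify "no change" 0 (· + 1)
        else if p.1 < p.2 then d.modify "increase" 0 (· + 1)
        else d.modify "decrease" 0 (· + 1)) d).getD "increase" 0
    = d.getD "increase" 0 + ps.countP (fun p => decide (p.1 < p.2)) := by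
  simpa using pvDictChar ps d "increase" (Or.inr (Or.inl rfl))
theorem pvDictDec (ps : List (Int × Int)) (d : PySem.Dict String Int) :
    (ps.foldl (fun (d : PySem.Dict String Int) (p : Int × Int) =>
        if p.1 == p.2 then d.modify "no change" 0 (· + 1)
        else if p.1 < p.2 then d.modify "increase" 0 (· + 1)
        else d.modify "decrease" 0 (· + 1)) d).getD "decrease" 0
    = d.getD "decrease" 0 + ps.countP (fun p => decide (p.2 < p.1)) := by
  simpa using pvDictChar ps d "decrease" (Or.inr (Or.inr rfl))

-- the literal initial dict's three entries are 0
theorem pvInitDict_nc :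
    (PySem.Dict.ofList [("increase", (0 : Int)), ("decrease", 0), ("no change", 0)]).getD "no change" 0 = 0 := by decide
theorem pvInitDict_inc :
    (PySem.Dict.ofList [("increase", (0 : Int)), ("decrease", 0), ("no change", 0)]).getD "increase" 0 = 0 := by decide
theorem pvInitDict_dec :
    (PySem.Dict.ofList [("increase", (0 : Int)), ("decrease", 0), ("no change", 0)]).getD "decrease" 0 = 0 := by decide

-- ===== VERDICT (by name: the statement is the Claim_ definition above) =====
theorem determineSafe_spec : Claim_equal_determineSafe := by
  intro xs _
  unfold Spec_determineSafe determineSafe determineSafe_alt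
  dsimp only
  rw [PySem.List.slice_from_one]
  rw [pvIdxFoldA xs]
  set ps := xs.zip xs.tail with hps
  rw [PySem.List.foldl_prod_mk
    (f := fun (m : Int) (p : Int × Int) => if |p.1 - p.2| > m then |p.1 - p.2| else m)
    (g := fun (s : Option Int × PySem.Dict String Int) (p : Int × Int) =>
      ((match s.1 with
        | none => some |p.1 - p.2|
        | some v => if |p.1 - p.2| < v then some |p.1 - p.2| else some v : Option Int),
       if p.1 == p.2 then s.2.modify "no change" 0 (· + 1)
       else if p.1 < p.2 then s.2.modify "increase" 0 (· + 1)
       else s.2.modify "decrease" 0 (· + 1)))]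
  rw [PySem.List.foldl_prod_mk
    (f := fun (m : Option Int) (p : Int × Int) =>
      (match m with
        | none => some |p.1 - p.2|
        | some v => if |p.1 - p.2| < v then some |p.1 - p.2| else some v : Option Int))
    (g := fun (d : PySem.Dict String Int) (p : Int × Int) =>
      if p.1 == p.2 then d.modify "no change" 0 (· + 1)
      else if p.1 < p.2 then d.modify "increase" 0 (· + 1)
      else d.modify "decrease" 0 (· + 1))]
  dsimp only
  rw [pvDictNc ps _, pvDictInc ps _, pvDictDec ps _]
  simp only [pvInitDict_nc, pvInitDict_inc, pvInitDict_dec, zero_add]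
  rw [Bool.eq_iff_iff]
  simp only [List.all_eq_true, List.forall_mem_map, Bool.and_eq_true, Bool.or_eq_true,
    decide_eq_true_eq]
  have hmax :
      (List.foldl (fun m (p : Int × Int) => if |p.1 - p.2| > m then |p.1 - p.2| else m) 0 ps > 3)
        ↔ ∃ p ∈ ps, 3 < |p.1 - p.2| := by
    rw [pvMaxChar]
    constructor
    · rintro (h | h)
      · omega
      · exact h
    · exact Or.inr
  have hminb : ((match List.foldl (fun (m : Option Int) (p : Int × Int) =>
        match m with
        | none => some |p.1 - p.2|
        | some v => if |p.1 - p.2| < v then some |p.1 - p.2| else some v) none ps with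
      | none => false
      | some v => decide (v < 1)) = true) ↔ ∃ p ∈ ps, |p.1 - p.2| < 1 := by
    have := pvMinChar ps none
    simp only [false_or] at this
    rw [← this]
    cases List.foldl (fun (m : Option Int) (p : Int × Int) =>
        match m with
        | none => some |p.1 - p.2|
        | some v => if |p.1 - p.2| < v then some |p.1 - p.2| else some v) none ps <;> simp
  constructor
  · intro h
    split_ifs at h with c1 c2 c3 c4
    rw [hmax] at c4
    rw [hminb] at c3
    push Not at c3 c4
    refine pvLogic ps (fun p hp => by have := c4 p hp; omega)
      (fun p hp => by have := c3 p hp; omega) ?_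
    rintro ⟨⟨p, hp, hplt⟩, ⟨q, hq, hqlt⟩⟩
    apply c1
    constructor
    · have : 0 < ps.countP (fun p => decide (p.1 < p.2)) :=
        List.countP_pos_iff.mpr ⟨p, hp, by simpa using hplt⟩
      omega
    · have : 0 < ps.countP (fun p => decide (p.2 < p.1)) :=
        List.countP_pos_iff.mpr ⟨q, hq, by simpa using hqlt⟩
      omega
  · intro h
    split_ifs with c1 c2 c3 c4
    · exfalso
      obtain ⟨hi, hd⟩ := c1
      obtain ⟨p, hp, hplt⟩ := List.countP_pos_iff.mp
        (by omega : 0 < ps.countP (fun p => decide (p.1 < p.2)))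
      obtain ⟨q, hq, hqlt⟩ := List.countP_pos_iff.mp
        (by omega : 0 < ps.countP (fun p => decide (p.2 < p.1)))
      simp only [decide_eq_true_eq] at hplt hqlt
      cases h with
      | inl h => have h1 := h p hp; have h2 := h q hq; omega
      | inr h => have h1 := h p hp; have h2 := h q hq; omega
    · exfalso
      obtain ⟨p, hp, hpe⟩ := List.countP_pos_iff.mp
        (by omega : 0 < ps.countP (fun p => p.1 == p.2))
      have hpe' : p.1 = p.2 := by simpa using hpe
      cases h with
      | inl h => have := h p hp; omega
      | inr h => have := h p hp; omega
    · exfalso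
      obtain ⟨p, hp, hp1⟩ := hminb.mp c3
      exact absurd hp1 (pvLogicRev ps p hp h).2
    · exfalso
      rw [hmax] at c4
      obtain ⟨p, hp, hp3⟩ := c4
      exact absurd hp3 (pvLogicRev ps p hp h).1
    · trivial
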